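-- pv_equiv track=rewrite | github.com/qweered/corepkgs-new | maintainers/scripts/sync-with-nixpkgs/sync-with-nixpkgs.py | filter_maintainer_changes
-- ===== SOURCE A (Python) =====
-- def filter_maintainer_changes(diff_content: str) -> tuple[str, bool]:
--     """Filter out maintainer-related changes from diff content.
--
--     Strategy: Remove entire hunks that ONLY contain maintainer changes.
--     This preserves hunk line counts and ensures valid patches.
--
--     Returns:
--         tuple: (filtered_diff_content, has_non_maintainer_changes)
--     """
--     if not diff_content:
--         return diff_content, False
--
--     lines = diff_content.splitlines(keepends=True)
--     result_lines = []
--     has_non_maintainer_changes = False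
--
--     i = 0
--     while i < len(lines):
--         line = lines[i]
--
--         # Keep file headers
--         if line.startswith("diff ") or line.startswith("---") or line.startswith("+++") or line.startswith("\\"):
--             result_lines.append(line)
--             i += 1
--             continue
--
--         # Process hunk markers
--         if line.startswith("@@"):
--             hunk_start = i
--             hunk_lines = []
--             i += 1
--
--             # Collect all lines in this hunk
--             change_lines = []
--             while i < len(lines):
--                 hunk_line = lines[i]
--                 # Stop at next hunk or file boundary
--                 if hunk_line.startswith("@@") or hunk_line.startswith("diff ") or hunk_line.startswith("---"):
--                     break
--                 hunk_lines.append(hunk_line)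
--                 if hunk_line.startswith("+") or hunk_line.startswith("-"):
--                     change_lines.append(hunk_line[1:].strip().lower())
--                 i += 1
--
--             # Check if all changes are maintainer-related
--             all_maintainer = True
--             if change_lines:
--                 all_changes_text = " ".join(change_lines)
--                 if "maintainers" not in all_changes_text:
--                     all_maintainer = False
--                 else:
--                     # Check if there are non-maintainer changes
--                     # Remove maintainer patterns and see if anything remains
--                     test_text = all_changes_text
--                     for pattern in ["maintainers", "with", "[", "]", "=", ";"]:
--                         test_text = test_text.replace(pattern, "")
--                     test_text = "".join(c for c in test_text if c.isalnum() or c.isspace())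
--                     if len(test_text.strip()) > 20:  # Significant non-maintainer content
--                         all_maintainer = False
--
--             # Keep hunk if it has non-maintainer changes
--             if not all_maintainer or not change_lines:
--                 has_non_maintainer_changes = True
--                 result_lines.append(line)  # Add hunk marker
--                 result_lines.extend(hunk_lines)
--             # else: skip entire hunk (maintainer-only)
--         else:
--             # Shouldn't happen, but keep it
--             result_lines.append(line)
--             i += 1
--
--     filtered_content = "".join(result_lines)
--     # Ensure patch ends with newline
--     if filtered_content and not filtered_content.endswith("\n"):
--         filtered_content += "\n"
--
--     return filtered_content, has_non_maintainer_changes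
-- ===== SOURCE B (Python) =====
-- def _maintainer_only(change_lines):
--     text = " ".join(change_lines)
--     if "maintainers" not in text:
--         return False
--     for pattern in ["maintainers", "with", "[", "]", "=", ";"]:
--         text = text.replace(pattern, "")
--     text = "".join(c for c in text if c.isalnum() or c.isspace())
--     return len(text.strip()) <= 20
--
--
-- def filter_maintainer_changes(diff_content: str) -> tuple[str, bool]:
--     """Group the diff into blocks first, then filter hunk blocks."""
--     # Phase 1: one pass grouping lines into blocks.
--     # A block is ("lit", line) or ["hunk", marker, body-lines].
--     blocks = []
--     for line in diff_content.splitlines(keepends=True):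
--         if blocks and blocks[-1][0] == "hunk" and not line.startswith(("@@", "diff ", "---")):
--             blocks[-1][2].append(line)
--         elif line.startswith("@@"):
--             blocks.append(["hunk", line, []])
--         else:
--             blocks.append(("lit", line))
--     # Phase 2: emit blocks, dropping maintainer-only hunks.
--     out = []
--     has_non_maintainer_changes = False
--     for b in blocks:
--         if b[0] == "lit":
--             out.append(b[1])
--         else:
--             marker, body = b[1], b[2]
--             change = [l[1:].strip().lower() for l in body if l.startswith(("+", "-"))]
--             if not change or not _maintainer_only(change):
--                 has_non_maintainer_changes = True
--                 out.append(marker)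
--                 out.extend(body)
--     content = "".join(out)
--     if content and not content.endswith("\n"):
--         content += "\n"
--     return content, has_non_maintainer_changes
-- ===== Notes on version B (the rewrite author's own statement) =====
-- stated objective: alternative
-- what changed: B replaces A's index-driven while loop with an inner hunk-collection loop by a two-phase pipeline: one pass groups the keepends-split lines into header/hunk blocks, a second pass emits blocks, dropping maintainer-only hunks.
import Mathlib
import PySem

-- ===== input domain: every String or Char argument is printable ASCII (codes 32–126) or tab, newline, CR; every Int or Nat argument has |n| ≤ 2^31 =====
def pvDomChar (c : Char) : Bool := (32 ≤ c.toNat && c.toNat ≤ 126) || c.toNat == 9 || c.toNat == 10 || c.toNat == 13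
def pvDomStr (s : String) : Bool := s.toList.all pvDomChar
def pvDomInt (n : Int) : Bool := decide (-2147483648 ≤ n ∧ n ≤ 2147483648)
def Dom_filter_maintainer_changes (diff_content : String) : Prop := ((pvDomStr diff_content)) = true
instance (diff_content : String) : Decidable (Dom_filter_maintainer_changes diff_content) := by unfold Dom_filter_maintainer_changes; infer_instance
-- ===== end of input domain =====

-- B groups the diff lines into a block list in one pass and then emits the blocks in a
-- second pass, instead of A's index-driven while loop with an inner collection loop;
-- the return values are identical.

-- shared primitive: str.splitlines(keepends=True), hand-ported (PySem only has the
-- keepends=False form); exact on the stated domain, where the only line breaks are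
-- "\n", "\r" and "\r\n".
def pvTakeLine : List Char → List Char × List Char
  | [] => ([], [])
  | c :: rest =>
    if c = '\n' then (['\n'], rest)
    else if c = '\r' then
      if rest.head? = some '\n' then (['\r', '\n'], rest.tail) else (['\r'], rest)
    else
      let p := pvTakeLine rest
      (c :: p.1, p.2)

theorem pvTakeLine_snd_le (s : List Char) : (pvTakeLine s).2.length ≤ s.length := by
  induction s with
  | nil => simp [pvTakeLine]
  | cons c rest ih =>
    simp only [pvTakeLine]
    split_ifs <;> simp_all [List.length_tail] <;> omega

theorem pvTakeLine_snd_lt (c : Char) (rest : List Char) :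
    (pvTakeLine (c :: rest)).2.length < (c :: rest).length := by
  have h := pvTakeLine_snd_le rest
  simp only [pvTakeLine]
  split_ifs <;> simp_all [List.length_tail]

def pvSplitKeep : List Char → List (List Char)
  | [] => []
  | c :: rest =>
    let p := pvTakeLine (c :: rest)
    p.1 :: pvSplitKeep p.2
  termination_by s => s.length
  decreasing_by exact pvTakeLine_snd_lt c rest

-- shared literal predicate: the hunk-ending prefixes ("@@", "diff ", "---"), used by both Pythons
def pvBreaks (l : List Char) : Bool :=
  PySem.Chars.startswith l ("@@".toList) || PySem.Chars.startswith l ("diff ".toList) ||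
    PySem.Chars.startswith l ("---".toList)

-- ===== PORT A =====
def pvIsHeader (l : List Char) : Bool :=
  PySem.Chars.startswith l ("diff ".toList) || PySem.Chars.startswith l ("---".toList) ||
    PySem.Chars.startswith l ("+++".toList) || PySem.Chars.startswith l ("\\".toList)

-- A's inner while loop: collect (hunk_lines, change_lines, remaining lines)
def pvCollectA : List (List Char) → List (List Char) × List (List Char) × List (List Char)
  | [] => ([], [], [])
  | l :: rest =>
    if pvBreaks l then ([], [], l :: rest)
    else
      let r := pvCollectA rest
      (l :: r.1,
       (if PySem.Chars.startswith l ['+'] || PySem.Chars.startswith l ['-'] then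
          [PySem.Chars.lower (PySem.Chars.strip (l.drop 1))]   -- l[1:].strip().lower(); l[1:] = drop 1, exact
        else []) ++ r.2.1,
       r.2.2)

theorem pvCollectA_len (ls : List (List Char)) : (pvCollectA ls).2.2.length ≤ ls.length := by
  induction ls with
  | nil => simp [pvCollectA]
  | cons l rest ih =>
    simp only [pvCollectA]
    split_ifs <;> simp <;> omega

-- A's outer while loop
def pvLoopA : List (List Char) → List (List Char) → Bool → List (List Char) × Bool
  | [], res, flag => (res, flag)
  | line :: rest, res, flag =>
    if pvIsHeader line then pvLoopA rest (res ++ [line]) flag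
    else if PySem.Chars.startswith line ("@@".toList) then
      let c := pvCollectA rest
      let all_maintainer : Bool :=
        if c.2.1.isEmpty then true
        else
          let text := PySem.Chars.join [' '] c.2.1
          if !(PySem.Chars.isIn ("maintainers".toList) text) then false
          else
            let t := ["maintainers", "with", "[", "]", "=", ";"].foldl
              (fun t p => PySem.Chars.replace t p.toList []) text
            let t := t.filter (fun ch => PySem.Chars.isalnum ch || PySem.Chars.isspace ch)
            !(decide ((PySem.Chars.strip t).length > 20))
      if !all_maintainer || c.2.1.isEmpty then
        pvLoopA c.2.2 ((res ++ [line]) ++ c.1) true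
      else
        pvLoopA c.2.2 res flag
    else pvLoopA rest (res ++ [line]) flag
  termination_by lines => lines.length
  decreasing_by
  · simp
  · exact Nat.lt_succ_of_le (pvCollectA_len rest)
  · exact Nat.lt_succ_of_le (pvCollectA_len rest)
  · simp

def filter_maintainer_changes (diff_content : String) : String × Bool :=
  if diff_content = "" then (diff_content, false)
  else
    let lines := pvSplitKeep diff_content.toList
    let r := pvLoopA lines [] false
    let filtered := r.1.flatten   -- "".join(result_lines)
    let filtered :=
      if !filtered.isEmpty && !(PySem.Chars.endswith filtered ['\n']) then filtered ++ ['\n']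
      else filtered
    (String.ofList filtered, r.2)

-- ===== PORT B =====
inductive PvBlock where
  | lit (line : List Char)
  | hunk (marker : List Char) (body : List (List Char))
deriving DecidableEq, Repr

-- phase 1: start a new block for a line
def pvNewBlock (blocks : List PvBlock) (line : List Char) : List PvBlock :=
  if PySem.Chars.startswith line ("@@".toList) then blocks ++ [.hunk line []]
  else blocks ++ [.lit line]

-- phase 1 step: extend the last hunk block, or start a new block
def pvAddLine (blocks : List PvBlock) (line : List Char) : List PvBlock :=
  match blocks.getLast? with
  | some (.hunk m body) =>
    if !pvBreaks line then blocks.dropLast ++ [.hunk m (body ++ [line])]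
    else pvNewBlock blocks line
  | _ => pvNewBlock blocks line

def pvMaintainerOnly (change : List (List Char)) : Bool :=
  let text := PySem.Chars.join [' '] change
  if !(PySem.Chars.isIn ("maintainers".toList) text) then false
  else
    let t := ["maintainers", "with", "[", "]", "=", ";"].foldl
      (fun t p => PySem.Chars.replace t p.toList []) text
    let t := t.filter (fun ch => PySem.Chars.isalnum ch || PySem.Chars.isspace ch)
    !(decide ((PySem.Chars.strip t).length > 20))

-- the change lines of a hunk body: l[1:].strip().lower() for the +/- lines (l[1:] = drop 1, exact)
def pvChange (body : List (List Char)) : List (List Char) :=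
  (body.filter (fun l => PySem.Chars.startswith l ['+'] || PySem.Chars.startswith l ['-'])).map
    (fun l => PySem.Chars.lower (PySem.Chars.strip (l.drop 1)))

-- phase 2 step: emit one block
def pvEmit (st : List (List Char) × Bool) (b : PvBlock) : List (List Char) × Bool :=
  match b with
  | .lit l => (st.1 ++ [l], st.2)
  | .hunk m body =>
    let change := pvChange body
    if change.isEmpty || !pvMaintainerOnly change then ((st.1 ++ [m]) ++ body, true)
    else st

def filter_maintainer_changes_alt (diff_content : String) : String × Bool :=
  let blocks := (pvSplitKeep diff_content.toList).foldl pvAddLine []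
  let r := blocks.foldl pvEmit ([], false)
  let content := r.1.flatten
  let content :=
    if !content.isEmpty && !(PySem.Chars.endswith content ['\n']) then content ++ ['\n']
    else content
  (String.ofList content, r.2)

-- ===== PRECONDITION & SPEC =====
def Spec_filter_maintainer_changes (diff_content : String) (out : String × Bool) : Prop := out = filter_maintainer_changes_alt diff_content
instance (diff_content : String) (out : String × Bool) : Decidable (Spec_filter_maintainer_changes diff_content out) := by unfold Spec_filter_maintainer_changes; infer_instance

-- ===== CLAIM (what is proved, stated in full; the proofs are below) =====
def Claim_equal_filter_maintainer_changes : Prop := ∀ (diff_content : String), Dom_filter_maintainer_changes diff_content → Spec_filter_maintainer_changes diff_content (filter_maintainer_changes diff_content)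

-- ===== LEMMAS AND PROOFS =====

-- proof-side recursive form of B's grouping pass
def pvTake (ls : List (List Char)) : List (List Char) := ls.takeWhile (fun l => !pvBreaks l)
def pvDrop (ls : List (List Char)) : List (List Char) := ls.dropWhile (fun l => !pvBreaks l)

def pvBlocksRec : List (List Char) → List PvBlock
  | [] => []
  | l :: rest =>
    if PySem.Chars.startswith l ("@@".toList) then
      .hunk l (pvTake rest) :: pvBlocksRec (pvDrop rest)
    else .lit l :: pvBlocksRec rest
  termination_by ls => ls.length
  decreasing_by
  · exact Nat.lt_succ_of_le (List.length_dropWhile_le _ _)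
  · simp

theorem pvCollectA_spec (ls : List (List Char)) :
    pvCollectA ls = (pvTake ls, pvChange (pvTake ls), pvDrop ls) := by
  induction ls with
  | nil => simp [pvCollectA, pvTake, pvDrop, pvChange]
  | cons l rest ih =>
    simp only [pvCollectA, pvTake, pvDrop, List.takeWhile, List.dropWhile]
    by_cases h : pvBreaks l
    · simp [h, pvChange]
    · simp only [h, Bool.not_false, ih]
      by_cases hp : (PySem.Chars.startswith l ['+'] || PySem.Chars.startswith l ['-']) = true
      · simp [pvChange, pvTake, pvDrop, hp]
      · simp [pvChange, pvTake, pvDrop, hp]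

-- a line starting with "@@" is not a header line
theorem pvAt_not_header {l : List Char} (h : PySem.Chars.startswith l ("@@".toList) = true) :
    pvIsHeader l = false := by
  obtain ⟨t, ht⟩ := (PySem.Chars.startswith_iff l _).mp h
  subst ht
  simp only [pvIsHeader, Bool.or_eq_false_iff]
  refine ⟨⟨⟨?_, ?_⟩, ?_⟩, ?_⟩ <;>
  · rw [← Bool.not_eq_true, PySem.Chars.startswith_iff]
    rintro ⟨u, hu⟩
    simp at hu

-- B's grouping foldl equals the recursive grouping
theorem pv_grouping (lines : List (List Char)) :
    (∀ (blocks : List PvBlock), (∀ m body, blocks.getLast? ≠ some (.hunk m body)) →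
        lines.foldl pvAddLine blocks = blocks ++ pvBlocksRec lines) ∧
    (∀ (pre : List PvBlock) (m : List Char) (body : List (List Char)),
        lines.foldl pvAddLine (pre ++ [.hunk m body]) =
          pre ++ PvBlock.hunk m (body ++ pvTake lines) :: pvBlocksRec (pvDrop lines)) := by
  induction lines with
  | nil =>
    constructor
    · intro blocks _; simp [pvBlocksRec]
    · intro pre m body; simp [pvBlocksRec, pvTake, pvDrop]
  | cons l rest ih =>
    obtain ⟨ih1, ih2⟩ := ih
    constructor
    · intro blocks hb
      have hstep : pvAddLine blocks l = pvNewBlock blocks l := by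
        unfold pvAddLine
        split
        · next m body hg => exact absurd hg (hb m body)
        · rfl
      rw [List.foldl_cons, hstep]
      unfold pvNewBlock
      by_cases hl : PySem.Chars.startswith l ("@@".toList) = true
      · rw [if_pos hl, ih2 blocks l [], pvBlocksRec, if_pos hl]
        simp
      · rw [if_neg hl, ih1 (blocks ++ [PvBlock.lit l]) (by simp), pvBlocksRec, if_neg hl]
        simp
    · intro pre m body
      rw [List.foldl_cons]
      have hg : (pre ++ [PvBlock.hunk m body]).getLast? = some (PvBlock.hunk m body) := by simp
      by_cases hbr : pvBreaks l = true
      · have hstep : pvAddLine (pre ++ [PvBlock.hunk m body]) l =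
            pvNewBlock (pre ++ [PvBlock.hunk m body]) l := by
          unfold pvAddLine; rw [hg]; simp [hbr]
        have ht1 : pvTake (l :: rest) = [] := by
          simp [pvTake, List.takeWhile, hbr]
        have ht2 : pvDrop (l :: rest) = l :: rest := by
          simp [pvDrop, List.dropWhile, hbr]
        rw [hstep]
        unfold pvNewBlock
        by_cases hl : PySem.Chars.startswith l ("@@".toList) = true
        · rw [if_pos hl, ih2 (pre ++ [PvBlock.hunk m body]) l [], ht1, ht2, pvBlocksRec, if_pos hl]
          simp
        · rw [if_neg hl, ih1 (pre ++ [PvBlock.hunk m body] ++ [PvBlock.lit l]) (by simp), ht1, ht2,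
            pvBlocksRec, if_neg hl]
          simp
      · have hstep : pvAddLine (pre ++ [PvBlock.hunk m body]) l =
            pre ++ [PvBlock.hunk m (body ++ [l])] := by
          unfold pvAddLine; rw [hg]; simp [hbr]
        rw [hstep, ih2 pre m (body ++ [l])]
        have ht1 : pvTake (l :: rest) = l :: pvTake rest := by
          simp [pvTake, List.takeWhile, hbr]
        have ht2 : pvDrop (l :: rest) = pvDrop rest := by
          simp [pvDrop, List.dropWhile, hbr]
        rw [ht1, ht2]
        simp

-- A's loop equals B's emitting pass over the recursive grouping
theorem pvLoopA_eq : ∀ (n : Nat) (lines : List (List Char)), lines.length ≤ n →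
    ∀ res flag, pvLoopA lines res flag = (pvBlocksRec lines).foldl pvEmit (res, flag) := by
  intro n
  induction n with
  | zero =>
    intro lines hlen res flag
    obtain rfl : lines = [] := List.eq_nil_of_length_eq_zero (Nat.le_zero.mp hlen)
    simp [pvLoopA, pvBlocksRec]
  | succ k ih =>
    intro lines hlen res flag
    match lines with
    | [] => simp [pvLoopA, pvBlocksRec]
    | line :: rest =>
      have hrk : rest.length ≤ k := by
        simp only [List.length_cons] at hlen; omega
      by_cases hat : PySem.Chars.startswith line ("@@".toList) = true
      · have hh := pvAt_not_header hat
        rw [pvLoopA, pvBlocksRec, if_pos hat]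
        rw [hh]
        simp only [Bool.false_eq_true, if_false, if_pos hat, pvCollectA_spec]
        have hdk : (pvDrop rest).length ≤ k :=
          le_trans (by simpa [pvDrop] using List.length_dropWhile_le (fun l => !pvBreaks l) rest) hrk
        have hcond :
            (!(if (pvChange (pvTake rest)).isEmpty = true then true
               else
                 if (!PySem.Chars.isIn "maintainers".toList
                       (PySem.Chars.join [' '] (pvChange (pvTake rest)))) = true then false
                 else
                   !decide
                     ((PySem.Chars.strip
                         (List.filter (fun ch => PySem.Chars.isalnum ch || PySem.Chars.isspace ch)
                           (List.foldl (fun t p => PySem.Chars.replace t p.toList [])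
                             (PySem.Chars.join [' '] (pvChange (pvTake rest)))
                             ["maintainers", "with", "[", "]", "=", ";"]))).length > 20)) ||
              (pvChange (pvTake rest)).isEmpty) =
            ((pvChange (pvTake rest)).isEmpty || !pvMaintainerOnly (pvChange (pvTake rest))) := by
          by_cases he : (pvChange (pvTake rest)).isEmpty = true
          · simp [he]
          · simp [he, pvMaintainerOnly]
        rw [hcond, List.foldl_cons]
        simp only [pvEmit]
        by_cases hk : ((pvChange (pvTake rest)).isEmpty ||
            !pvMaintainerOnly (pvChange (pvTake rest))) = true
        · rw [if_pos hk, if_pos hk]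
          exact ih (pvDrop rest) hdk (res ++ [line] ++ pvTake rest) true
        · rw [if_neg hk, if_neg hk]
          exact ih (pvDrop rest) hdk res flag
      · rw [pvLoopA, pvBlocksRec, if_neg hat, if_neg hat, List.foldl_cons]
        simp only [pvEmit]
        by_cases hhd : pvIsHeader line = true
        · rw [if_pos hhd]
          exact ih rest hrk (res ++ [line]) flag
        · rw [if_neg hhd]
          exact ih rest hrk (res ++ [line]) flag

-- ===== VERDICT (by name: the statement is the Claim_ definition above) =====
theorem filter_maintainer_changes_spec : Claim_equal_filter_maintainer_changes := by
  intro d _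
  unfold Spec_filter_maintainer_changes filter_maintainer_changes filter_maintainer_changes_alt
  by_cases hd : d = ""
  · subst hd
    simp [pvSplitKeep]
  · rw [if_neg hd]
    have hg := ((pv_grouping (pvSplitKeep d.toList)).1 [] (by simp))
    have hl := pvLoopA_eq (pvSplitKeep d.toList).length (pvSplitKeep d.toList) le_rfl [] false
    simp only [List.nil_append] at hg
    simp only [hg, hl]
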